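-- pv_equiv track=rewrite | github.com/wanyuanshenwanda/MLhw | src/pipeline.py | build_feature_groups
-- ===== SOURCE A (Python) =====
-- from typing import Dict, List
--
-- def build_feature_groups(feature_columns: List[str]) -> Dict[str, List[str]]:
--     feature_set = set(feature_columns)
--     textual = [
--         col
--         for col in feature_columns
--         if col.startswith("has_")
--         or col in {
--             "title_words",
--             "title_chars",
--             "title_readability",
--             "body_words",
--             "body_chars",
--             "body_readability",
--         }
--     ]
--     structure = [
--         col
--         for col in ["directories", "language_types", "file_types"]
--         if col in feature_set
--     ]
--     churn = [
--         col
--         for col in [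
--             "lines_added",
--             "lines_deleted",
--             "segs_added",
--             "segs_deleted",
--             "segs_changed",
--             "files_added",
--             "files_deleted",
--             "files_changed",
--             "modify_proportion",
--             "modify_entropy",
--             "test_churn",
--             "non_test_churn",
--             "commits",
--             "additions",
--             "deletions",
--             "changed_files",
--         ]
--         if col in feature_set
--     ]
--     author_profile = [
--         col for col in feature_columns if col.startswith("author_") or col == "prev_prs"
--     ]
--     project_profile = [col for col in feature_columns if col.startswith("project_")]
--     reviewer_network = [col for col in feature_columns if col.startswith("reviewer_")]
--     groups = {
--         "textual": textual,
--         "structure": structure,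
--         "code_churn": churn,
--         "author_profile": author_profile,
--         "project_profile": project_profile,
--         "reviewer_network": reviewer_network,
--     }
--     return {k: v for k, v in groups.items() if v}
-- ===== SOURCE B (Python) =====
-- def build_feature_groups(feature_columns):
--     """Single classifying pass over feature_columns (the four prefix/membership
--     groups are mutually exclusive), instead of four separate scans."""
--     feature_set = set(feature_columns)
--     textual, author_profile, project_profile, reviewer_network = [], [], [], []
--     for col in feature_columns:
--         if col.startswith("has_") or col in {
--             "title_words", "title_chars", "title_readability",
--             "body_words", "body_chars", "body_readability",
--         }:
--             textual.append(col)
--         elif col.startswith("author_") or col == "prev_prs":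
--             author_profile.append(col)
--         elif col.startswith("project_"):
--             project_profile.append(col)
--         elif col.startswith("reviewer_"):
--             reviewer_network.append(col)
--     structure = [
--         c for c in ["directories", "language_types", "file_types"] if c in feature_set
--     ]
--     code_churn = [
--         c
--         for c in [
--             "lines_added", "lines_deleted", "segs_added", "segs_deleted",
--             "segs_changed", "files_added", "files_deleted", "files_changed",
--             "modify_proportion", "modify_entropy", "test_churn", "non_test_churn",
--             "commits", "additions", "deletions", "changed_files",
--         ]
--         if c in feature_set
--     ]
--     result = {}
--     for name, cols in [
--         ("textual", textual),
--         ("structure", structure),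
--         ("code_churn", code_churn),
--         ("author_profile", author_profile),
--         ("project_profile", project_profile),
--         ("reviewer_network", reviewer_network),
--     ]:
--         if cols:
--             result[name] = cols
--     return result
-- ===== Notes on version B (the rewrite author's own statement) =====
-- stated objective: alternative
-- what changed: Replaces A's four separate comprehension scans of feature_columns with one single classifying pass (an if/elif chain over the mutually exclusive prefix/membership tests) that fills textual/author_profile/project_profile/reviewer_network together; structure and code_churn stay fixed-list filters and empty groups are dropped while building the result dict.
import Mathlib
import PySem

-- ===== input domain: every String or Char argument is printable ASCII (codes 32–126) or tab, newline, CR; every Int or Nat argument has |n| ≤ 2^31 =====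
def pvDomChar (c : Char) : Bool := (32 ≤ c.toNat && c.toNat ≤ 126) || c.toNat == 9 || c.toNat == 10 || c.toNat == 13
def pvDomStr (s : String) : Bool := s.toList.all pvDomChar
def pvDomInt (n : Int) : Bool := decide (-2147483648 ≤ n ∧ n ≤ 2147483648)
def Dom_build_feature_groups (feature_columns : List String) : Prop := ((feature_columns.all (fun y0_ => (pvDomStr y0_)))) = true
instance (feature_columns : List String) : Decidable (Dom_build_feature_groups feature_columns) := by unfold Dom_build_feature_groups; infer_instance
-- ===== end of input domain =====

-- B replaces A's four separate scans of feature_columns by one single classifying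
-- pass (if/elif over the mutually exclusive group tests); same cost class, different decomposition.


-- shared literal conditions: both Pythons spell these tests out verbatim
def pvTextualNames : PySem.Set String :=
  PySem.Set.ofList ["title_words", "title_chars", "title_readability",
                    "body_words", "body_chars", "body_readability"]
def pvIsTextual (c : String) : Bool :=
  PySem.Str.startswith c "has_" || PySem.Set.contains pvTextualNames c
def pvIsAuthor (c : String) : Bool :=
  PySem.Str.startswith c "author_" || c == "prev_prs"
def pvIsProject (c : String) : Bool := PySem.Str.startswith c "project_"
def pvIsReviewer (c : String) : Bool := PySem.Str.startswith c "reviewer_"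
def pvStructureNames : List String := ["directories", "language_types", "file_types"]
def pvChurnNames : List String :=
  ["lines_added", "lines_deleted", "segs_added", "segs_deleted",
   "segs_changed", "files_added", "files_deleted", "files_changed",
   "modify_proportion", "modify_entropy", "test_churn", "non_test_churn",
   "commits", "additions", "deletions", "changed_files"]

-- ===== PORT A =====
-- four comprehensions over feature_columns, two fixed-list comprehensions, then the
-- final dict comprehension; its keys are distinct literals, so it is exactly a filter of the items
def build_feature_groups (feature_columns : List String) : List (String × List String) :=
  let feature_set := PySem.Set.ofList feature_columns
  let textual := feature_columns.filter pvIsTextual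
  let structure_ := pvStructureNames.filter (fun c => PySem.Set.contains feature_set c)
  let churn := pvChurnNames.filter (fun c => PySem.Set.contains feature_set c)
  let author_profile := feature_columns.filter pvIsAuthor
  let project_profile := feature_columns.filter pvIsProject
  let reviewer_network := feature_columns.filter pvIsReviewer
  let groups : List (String × List String) :=
    [("textual", textual), ("structure", structure_), ("code_churn", churn),
     ("author_profile", author_profile), ("project_profile", project_profile),
     ("reviewer_network", reviewer_network)]
  groups.filter (fun kv => !kv.2.isEmpty)

-- ===== PORT B =====
-- the if/elif classifying step of Source B's single loop (state: the four growing lists)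
def pvClassify (acc : List String × List String × List String × List String)
    (col : String) : List String × List String × List String × List String :=
  if pvIsTextual col then (acc.1 ++ [col], acc.2.1, acc.2.2.1, acc.2.2.2)
  else if pvIsAuthor col then (acc.1, acc.2.1 ++ [col], acc.2.2.1, acc.2.2.2)
  else if pvIsProject col then (acc.1, acc.2.1, acc.2.2.1 ++ [col], acc.2.2.2)
  else if pvIsReviewer col then (acc.1, acc.2.1, acc.2.2.1, acc.2.2.2 ++ [col])
  else acc

def build_feature_groups_alt (feature_columns : List String) : List (String × List String) :=
  let feature_set := PySem.Set.ofList feature_columns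
  let tapr := feature_columns.foldl pvClassify ([], [], [], [])
  let structure_ := pvStructureNames.filter (fun c => PySem.Set.contains feature_set c)
  let churn := pvChurnNames.filter (fun c => PySem.Set.contains feature_set c)
  -- 'result = {}; for name, cols in …: if cols: result[name] = cols; return result'
  (([("textual", tapr.1), ("structure", structure_), ("code_churn", churn),
     ("author_profile", tapr.2.1), ("project_profile", tapr.2.2.1),
     ("reviewer_network", tapr.2.2.2)] : List (String × List String)).foldl
    (fun res kv => if kv.2.isEmpty then res else PySem.Dict.insert res kv.1 kv.2)
    PySem.Dict.empty).items

-- ===== PRECONDITION & SPEC =====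
def Spec_build_feature_groups (feature_columns : List String) (out : List (String × List String)) : Prop := out = build_feature_groups_alt feature_columns
instance (feature_columns : List String) (out : List (String × List String)) : Decidable (Spec_build_feature_groups feature_columns out) := by unfold Spec_build_feature_groups; infer_instance

-- ===== CLAIM (what is proved, stated in full; the proofs are below) =====
def Claim_equal_build_feature_groups : Prop := ∀ (feature_columns : List String), Dom_build_feature_groups feature_columns → Spec_build_feature_groups feature_columns (build_feature_groups feature_columns)

-- ===== LEMMAS AND PROOFS =====

-- a string starting with prefix p (whose first char is c) has first char c
theorem pv_head_of_sw (s p : String) (c : Char) (t : List Char)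
    (hpt : p.toList = c :: t) (h : PySem.Str.startswith s p = true) :
    s.toList.head? = some c := by
  rw [PySem.Str.startswith_eq] at h
  rw [PySem.Chars.startswith_iff] at h
  rcases h with ⟨u, hu⟩
  rw [hpt] at hu
  rw [← hu]
  rfl

theorem pv_author_not_textual (c : String) (h : pvIsAuthor c = true) :
    pvIsTextual c = false := by
  unfold pvIsAuthor at h
  rcases (by simpa using h : PySem.Str.startswith c "author_" = true ∨ (c == "prev_prs") = true) with h1 | h2
  · have hhead := pv_head_of_sw c "author_" 'a' "uthor_".toList rfl h1
    unfold pvIsTextual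
    rw [Bool.or_eq_false_iff]
    constructor
    · by_contra hh
      rw [Bool.not_eq_false] at hh
      have := pv_head_of_sw c "has_" 'h' "as_".toList rfl hh
      rw [hhead] at this
      simp at this
    · by_contra hh
      rw [Bool.not_eq_false, PySem.Set.contains_iff] at hh
      unfold pvTextualNames at hh
      rw [PySem.Set.mem_ofList] at hh
      fin_cases hh <;> simp_all
  · have hc : c = "prev_prs" := by
      have := (beq_iff_eq).mp h2
      exact this
    subst hc; decide

theorem pv_project_not_textual (c : String) (h : pvIsProject c = true) :
    pvIsTextual c = false := by
  unfold pvIsProject at h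
  have hhead := pv_head_of_sw c "project_" 'p' "roject_".toList rfl h
  unfold pvIsTextual
  rw [Bool.or_eq_false_iff]
  constructor
  · by_contra hh
    rw [Bool.not_eq_false] at hh
    have := pv_head_of_sw c "has_" 'h' "as_".toList rfl hh
    rw [hhead] at this; simp at this
  · by_contra hh
    rw [Bool.not_eq_false, PySem.Set.contains_iff] at hh
    unfold pvTextualNames at hh
    rw [PySem.Set.mem_ofList] at hh
    fin_cases hh <;> simp_all

theorem pv_project_not_author (c : String) (h : pvIsProject c = true) :
    pvIsAuthor c = false := by
  unfold pvIsProject at h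
  have hhead := pv_head_of_sw c "project_" 'p' "roject_".toList rfl h
  unfold pvIsAuthor
  rw [Bool.or_eq_false_iff]
  constructor
  · by_contra hh
    rw [Bool.not_eq_false] at hh
    have := pv_head_of_sw c "author_" 'a' "uthor_".toList rfl hh
    rw [hhead] at this; simp at this
  · by_contra hh
    rw [Bool.not_eq_false] at hh
    have hc : c = "prev_prs" := beq_iff_eq.mp hh
    subst hc; exact absurd h (by decide)

theorem pv_reviewer_not_textual (c : String) (h : pvIsReviewer c = true) :
    pvIsTextual c = false := by
  unfold pvIsReviewer at h
  have hhead := pv_head_of_sw c "reviewer_" 'r' "eviewer_".toList rfl h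
  unfold pvIsTextual
  rw [Bool.or_eq_false_iff]
  constructor
  · by_contra hh
    rw [Bool.not_eq_false] at hh
    have := pv_head_of_sw c "has_" 'h' "as_".toList rfl hh
    rw [hhead] at this; simp at this
  · by_contra hh
    rw [Bool.not_eq_false, PySem.Set.contains_iff] at hh
    unfold pvTextualNames at hh
    rw [PySem.Set.mem_ofList] at hh
    fin_cases hh <;> simp_all

theorem pv_reviewer_not_author (c : String) (h : pvIsReviewer c = true) :
    pvIsAuthor c = false := by
  unfold pvIsReviewer at h
  have hhead := pv_head_of_sw c "reviewer_" 'r' "eviewer_".toList rfl h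
  unfold pvIsAuthor
  rw [Bool.or_eq_false_iff]
  constructor
  · by_contra hh
    rw [Bool.not_eq_false] at hh
    have := pv_head_of_sw c "author_" 'a' "uthor_".toList rfl hh
    rw [hhead] at this; simp at this
  · by_contra hh
    rw [Bool.not_eq_false] at hh
    have hc : c = "prev_prs" := beq_iff_eq.mp hh
    subst hc; exact absurd h (by decide)

theorem pv_reviewer_not_project (c : String) (h : pvIsReviewer c = true) :
    pvIsProject c = false := by
  unfold pvIsReviewer at h
  have hhead := pv_head_of_sw c "reviewer_" 'r' "eviewer_".toList rfl h
  unfold pvIsProject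
  by_contra hh
  rw [Bool.not_eq_false] at hh
  have := pv_head_of_sw c "project_" 'p' "roject_".toList rfl hh
  rw [hhead] at this; simp at this

-- the single pass computes the four filters (with elif-residual conditions)
theorem pv_classify_spec (fc : List String) :
    ∀ t a p r : List String,
    fc.foldl pvClassify (t, a, p, r) =
      (t ++ fc.filter pvIsTextual,
       a ++ fc.filter (fun c => !pvIsTextual c && pvIsAuthor c),
       p ++ fc.filter (fun c => !pvIsTextual c && !pvIsAuthor c && pvIsProject c),
       r ++ fc.filter (fun c => !pvIsTextual c && !pvIsAuthor c && !pvIsProject c && pvIsReviewer c)) := by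
  induction fc with
  | nil => intro t a p r; simp [List.filter]
  | cons x xs ih =>
    intro t a p r
    have hcl : pvClassify (t, a, p, r) x =
        (if pvIsTextual x then t ++ [x] else t,
         if !pvIsTextual x && pvIsAuthor x then a ++ [x] else a,
         if !pvIsTextual x && !pvIsAuthor x && pvIsProject x then p ++ [x] else p,
         if !pvIsTextual x && !pvIsAuthor x && !pvIsProject x && pvIsReviewer x then r ++ [x] else r) := by
      unfold pvClassify
      cases pvIsTextual x <;> cases pvIsAuthor x <;>
        cases pvIsProject x <;> cases pvIsReviewer x <;> simp
    rw [List.foldl_cons, hcl, ih]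
    simp only [List.filter_cons]
    cases hT : pvIsTextual x <;> cases hA : pvIsAuthor x <;>
      cases hP : pvIsProject x <;> cases hR : pvIsReviewer x <;>
      simp [hT, hA, hP, hR, List.append_assoc]

-- the elif residuals coincide with A's plain conditions (groups are disjoint)
theorem pv_filter_author (fc : List String) :
    fc.filter (fun c => !pvIsTextual c && pvIsAuthor c) = fc.filter pvIsAuthor := by
  apply List.filter_congr
  intro x _
  cases hA : pvIsAuthor x
  · simp
  · simp [pv_author_not_textual x hA]

theorem pv_filter_project (fc : List String) :
    fc.filter (fun c => !pvIsTextual c && !pvIsAuthor c && pvIsProject c) =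
      fc.filter pvIsProject := by
  apply List.filter_congr
  intro x _
  cases hP : pvIsProject x
  · simp
  · simp [pv_project_not_textual x hP, pv_project_not_author x hP]

theorem pv_filter_reviewer (fc : List String) :
    fc.filter (fun c => !pvIsTextual c && !pvIsAuthor c && !pvIsProject c && pvIsReviewer c) =
      fc.filter pvIsReviewer := by
  apply List.filter_congr
  intro x _
  cases hR : pvIsReviewer x
  · simp
  · simp [pv_reviewer_not_textual x hR, pv_reviewer_not_author x hR,
          pv_reviewer_not_project x hR]

-- assembling the six (distinct-literal-key) groups: A's item filter = B's insert loop
theorem pv_assemble (t s c a p r : List String) :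
    ([("textual", t), ("structure", s), ("code_churn", c),
      ("author_profile", a), ("project_profile", p),
      ("reviewer_network", r)] : List (String × List String)).filter
        (fun kv => !kv.2.isEmpty) =
    (([("textual", t), ("structure", s), ("code_churn", c),
       ("author_profile", a), ("project_profile", p),
       ("reviewer_network", r)] : List (String × List String)).foldl
      (fun res kv => if kv.2.isEmpty then res else PySem.Dict.insert res kv.1 kv.2)
      PySem.Dict.empty).items := by
  cases ht : t.isEmpty <;> cases hs : s.isEmpty <;> cases hc : c.isEmpty <;>
    cases ha : a.isEmpty <;> cases hp : p.isEmpty <;> cases hr : r.isEmpty <;>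
    simp [List.filter, List.foldl, ht, hs, hc, ha, hp, hr,
          PySem.Dict.insert, PySem.Dict.empty, PySem.Dict.contains]

-- ===== VERDICT (by name: the statement is the Claim_ definition above) =====
theorem build_feature_groups_spec : Claim_equal_build_feature_groups := by
  intro fc _
  unfold Spec_build_feature_groups build_feature_groups build_feature_groups_alt
  simp only [pv_classify_spec, pv_filter_author, pv_filter_project, pv_filter_reviewer,
             List.nil_append]
  exact pv_assemble _ _ _ _ _ _
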